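-- pv_equiv track=rewrite | github.com/elcrezoo/AIRQUALITY-AI | aerosense_ai/daily_csv.py | _genel_saglik_from_rows
-- ===== SOURCE A (Python) =====
-- def _genel_saglik_from_rows(health_rows):
--     if not health_rows:
--         return "Bilinmiyor"
--     if any((r.get("status") or "") == "hata" for r in health_rows):
--         return "Hata"
--     if any((r.get("status") or "") == "uyari" for r in health_rows):
--         return "Uyari"
--     return "Saglikli"
-- ===== SOURCE B (Python) =====
-- def _genel_saglik_from_rows(health_rows):
--     if not health_rows:
--         return "Bilinmiyor"
--     has_hata = False
--     has_uyari = False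
--     for r in health_rows:
--         s = r.get("status") or ""
--         if s == "hata":
--             has_hata = True
--         elif s == "uyari":
--             has_uyari = True
--     if has_hata:
--         return "Hata"
--     if has_uyari:
--         return "Uyari"
--     return "Saglikli"
-- ===== Notes on version B (the rewrite author's own statement) =====
-- stated objective: alternative
-- what changed: Replaces the three separate any() scans over health_rows with a single accumulator pass that records has_hata/has_uyari flags and then makes one priority-ordered decision.
import Mathlib
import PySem

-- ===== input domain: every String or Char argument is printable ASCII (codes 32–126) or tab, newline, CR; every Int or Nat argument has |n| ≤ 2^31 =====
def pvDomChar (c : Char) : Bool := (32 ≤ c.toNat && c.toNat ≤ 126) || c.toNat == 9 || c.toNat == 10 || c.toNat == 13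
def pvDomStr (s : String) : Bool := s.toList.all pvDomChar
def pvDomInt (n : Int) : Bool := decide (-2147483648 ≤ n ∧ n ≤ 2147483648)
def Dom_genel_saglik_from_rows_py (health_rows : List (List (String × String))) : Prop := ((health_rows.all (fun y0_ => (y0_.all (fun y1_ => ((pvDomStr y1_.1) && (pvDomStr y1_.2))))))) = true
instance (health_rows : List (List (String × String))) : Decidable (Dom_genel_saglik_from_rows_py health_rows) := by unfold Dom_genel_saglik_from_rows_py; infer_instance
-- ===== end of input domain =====

-- B replaces A's three separate any-scans with a single accumulator pass plus one
-- priority-ordered decision; same result, same O(n) cost (objective: alternative).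
-- ===== PORT A =====
-- Each row dict is an association list (insertion order, first-match lookup).
-- (r.get("status") or ""): get() yields None -> "" and a stored "" is falsy -> "",
-- so first-match lookup with default "" is exact.
def rowStatus (r : List (String × String)) : String :=
  ((r.find? (fun p => p.1 == "status")).map Prod.snd).getD ""
def genel_saglik_from_rows_py (health_rows : List (List (String × String))) : String :=
  if health_rows = [] then "Bilinmiyor"
  else if health_rows.any (fun r => rowStatus r == "hata") then "Hata"
  else if health_rows.any (fun r => rowStatus r == "uyari") then "Uyari"
  else "Saglikli"

-- ===== PORT B =====
-- loop body of B's single pass: update the (has_hata, has_uyari) flags with row r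
def pvStep (acc : Bool × Bool) (r : List (String × String)) : Bool × Bool :=
  let s := rowStatus r
  if s == "hata" then (true, acc.2)
  else if s == "uyari" then (acc.1, true)
  else acc

def genel_saglik_from_rows_py_alt (health_rows : List (List (String × String))) : String :=
  if health_rows = [] then "Bilinmiyor"
  else
    let flags := health_rows.foldl pvStep (false, false)
    if flags.1 then "Hata"
    else if flags.2 then "Uyari"
    else "Saglikli"

-- ===== PRECONDITION & SPEC =====
def Spec_genel_saglik_from_rows_py (health_rows : List (List (String × String))) (out : String) : Prop := out = genel_saglik_from_rows_py_alt health_rows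
instance (health_rows : List (List (String × String))) (out : String) : Decidable (Spec_genel_saglik_from_rows_py health_rows out) := by unfold Spec_genel_saglik_from_rows_py; infer_instance

-- ===== CLAIM (what is proved, stated in full; the proofs are below) =====
def Claim_equal_genel_saglik_from_rows_py : Prop := ∀ (health_rows : List (List (String × String))), Dom_genel_saglik_from_rows_py health_rows → Spec_genel_saglik_from_rows_py health_rows (genel_saglik_from_rows_py health_rows)

-- ===== LEMMAS AND PROOFS =====
theorem pvStep_eq (acc : Bool × Bool) (r : List (String × String)) :
    pvStep acc r = (acc.1 || (rowStatus r == "hata"), acc.2 || (rowStatus r == "uyari")) := by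
  unfold pvStep
  by_cases h1 : rowStatus r = "hata"
  · simp [h1]
  · by_cases h2 : rowStatus r = "uyari"
    · simp [h1, h2]
    · have e1 : (rowStatus r == "hata") = false := beq_eq_false_iff_ne.mpr h1
      have e2 : (rowStatus r == "uyari") = false := beq_eq_false_iff_ne.mpr h2
      simp [e1, e2]

theorem flags_fold_eq (hr : List (List (String × String))) (a b : Bool) :
    hr.foldl pvStep (a, b)
    = (a || hr.any (fun r => rowStatus r == "hata"),
       b || hr.any (fun r => rowStatus r == "uyari")) := by
  induction hr generalizing a b with
  | nil => simp
  | cons r tl ih =>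
    rw [List.foldl_cons, pvStep_eq, ih]
    simp [Bool.or_assoc]

-- ===== VERDICT (by name: the statement is the Claim_ definition above) =====
theorem genel_saglik_from_rows_py_spec : Claim_equal_genel_saglik_from_rows_py := by
  intro hr _
  unfold Spec_genel_saglik_from_rows_py genel_saglik_from_rows_py genel_saglik_from_rows_py_alt
  by_cases he : hr = []
  · simp [he]
  · simp [he, flags_fold_eq]
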